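-- pv_equiv track=rewrite | github.com/12somyasahu/arc-lite | src/data/dataset.py | tokens_to_grid
-- ===== SOURCE A (Python) =====
-- PAD_TOKEN  = 10
--
-- BOS_TOKEN  = 11
--
-- EOS_TOKEN  = 12
--
-- SEP_TOKEN  = 13   # separates input grid from output grid in the sequence
--
-- ROW_TOKEN  = 14   # appended at the end of each row
--
-- def tokens_to_grid(tokens: list[int], width: int) -> list[list[int]]:
--     """
--     Reconstructs a 2D grid from a flat token sequence.
--     Stops at EOS_TOKEN or end of list.
--     Strips ROW_TOKEN, PAD_TOKEN, BOS_TOKEN, EOS_TOKEN, SEP_TOKEN.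
--     """
--     grid = []
--     row = []
--     special = {PAD_TOKEN, BOS_TOKEN, EOS_TOKEN, SEP_TOKEN}
--
--     for tok in tokens:
--         if tok == EOS_TOKEN:
--             break
--         if tok in special:
--             continue
--         if tok == ROW_TOKEN:
--             if row:
--                 grid.append(row)
--             row = []
--         else:
--             row.append(tok)
--
--     if row:  # flush last row if no trailing ROW_TOKEN
--         grid.append(row)
--
--     return grid
-- ===== SOURCE B (Python) =====
-- PAD_TOKEN  = 10
-- BOS_TOKEN  = 11
-- EOS_TOKEN  = 12
-- SEP_TOKEN  = 13
-- ROW_TOKEN  = 14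
--
-- def tokens_to_grid(tokens: list[int], width: int) -> list[list[int]]:
--     # 1) truncate at the first EOS; 2) filter out PAD/BOS/SEP;
--     # 3) split on ROW_TOKEN, keeping only non-empty segments.
--     cut = tokens.index(EOS_TOKEN) if EOS_TOKEN in tokens else len(tokens)
--     cleaned = [t for t in tokens[:cut] if not (t == PAD_TOKEN or t == BOS_TOKEN or t == SEP_TOKEN)]
--     grid = []
--     while ROW_TOKEN in cleaned:
--         i = cleaned.index(ROW_TOKEN)
--         if i:
--             grid.append(cleaned[:i])
--         cleaned = cleaned[i+1:]
--     if cleaned: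
--         grid.append(cleaned)
--     return grid
-- ===== Notes on version B (the rewrite author's own statement) =====
-- stated objective: simpler
-- what changed: Replaces A's single stateful loop with mutable (grid, row) state by a three-stage pipeline: truncate the list at the first EOS_TOKEN, filter out PAD/BOS/SEP with a comprehension, then split on ROW_TOKEN keeping only non-empty segments.
import Mathlib
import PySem

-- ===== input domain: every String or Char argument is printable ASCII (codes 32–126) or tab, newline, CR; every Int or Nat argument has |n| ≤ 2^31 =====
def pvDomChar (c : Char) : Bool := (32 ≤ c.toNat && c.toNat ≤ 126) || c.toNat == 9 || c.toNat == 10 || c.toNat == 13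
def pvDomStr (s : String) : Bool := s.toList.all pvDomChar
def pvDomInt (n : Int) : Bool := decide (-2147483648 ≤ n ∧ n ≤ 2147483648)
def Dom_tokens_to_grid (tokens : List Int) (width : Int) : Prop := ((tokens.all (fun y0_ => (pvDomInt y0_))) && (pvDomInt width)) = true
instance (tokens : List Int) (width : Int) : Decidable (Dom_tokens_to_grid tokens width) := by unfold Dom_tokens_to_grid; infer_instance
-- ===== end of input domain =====

-- B rebuilds the grid as a three-stage pipeline (truncate at first EOS, filter specials,
-- split on ROW_TOKEN keeping non-empty segments) instead of A's single stateful loop.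

-- ===== PORT A =====
-- A's for-loop over tokens with mutable (grid, row); the `break` on EOS falls through
-- to the final `if row: grid.append(row)` flush, transcribed inline.
def tokensToGridLoopA : List Int → List Int → List (List Int) → List (List Int)
  | [], row, grid => if row ≠ [] then grid ++ [row] else grid
  | t :: ts, row, grid =>
    if t = 12 then (if row ≠ [] then grid ++ [row] else grid)
    else if t = 10 ∨ t = 11 ∨ t = 12 ∨ t = 13 then tokensToGridLoopA ts row grid
    else if t = 14 then tokensToGridLoopA ts [] (if row ≠ [] then grid ++ [row] else grid)
    else tokensToGridLoopA ts (row ++ [t]) grid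

def tokens_to_grid (tokens : List Int) (_width : Int) : List (List Int) :=
  tokensToGridLoopA tokens [] []

-- ===== PORT B =====
-- Source B's while-loop: repeatedly cut at the first ROW_TOKEN, appending non-empty segments to grid.
def pvSplitRowsB (grid : List (List Int)) (l : List Int) : List (List Int) :=
  match h : PySem.List.index? l 14 with
  | none => if l ≠ [] then grid ++ [l] else grid
  | some i => pvSplitRowsB (if i ≠ 0 then grid ++ [l.take i] else grid) (l.drop (i + 1))
termination_by l.length
decreasing_by
  obtain ⟨hk, -, -⟩ := PySem.List.getElem_of_index?_eq_some h
  simp only [List.length_drop]; omega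

def tokens_to_grid_alt (tokens : List Int) (_width : Int) : List (List Int) :=
  -- tokens[:cut] with cut = tokens.index(12) (a nonnegative in-range index) is exactly List.take
  pvSplitRowsB []
    ((match PySem.List.index? tokens 12 with
      | some i => tokens.take i
      | none => tokens).filter (fun t => !(t == 10 || t == 11 || t == 13)))

-- ===== PRECONDITION & SPEC =====
def Spec_tokens_to_grid (tokens : List Int) (width : Int) (out : List (List Int)) : Prop := out = tokens_to_grid_alt tokens width
instance (tokens : List Int) (width : Int) (out : List (List Int)) : Decidable (Spec_tokens_to_grid tokens width out) := by unfold Spec_tokens_to_grid; infer_instance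

-- ===== CLAIM (what is proved, stated in full; the proofs are below) =====
def Claim_equal_tokens_to_grid : Prop := ∀ (tokens : List Int) (width : Int), Dom_tokens_to_grid tokens width → Spec_tokens_to_grid tokens width (tokens_to_grid tokens width)

-- ===== LEMMAS AND PROOFS =====

-- proof-side characterisation of "truncate at first 12, then drop 10/11/13"
def pvClean : List Int → List Int
  | [] => []
  | t :: ts =>
    if t = 12 then []
    else if t = 10 ∨ t = 11 ∨ t = 13 then pvClean ts
    else t :: pvClean ts

lemma pvClean_eq_trunc_filter (ts : List Int) :
    ((match PySem.List.index? ts 12 with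
      | some i => ts.take i
      | none => ts).filter (fun t => !(t == 10 || t == 11 || t == 13))) = pvClean ts := by
  induction ts with
  | nil => simp [pvClean, PySem.List.index?_eq_idxOf?]
  | cons t ts ih =>
    by_cases h12 : t = 12
    · subst h12
      rw [PySem.List.index?_cons_self]
      simp [pvClean]
    · rw [PySem.List.index?_cons_of_ne ts h12]
      cases hidx : PySem.List.index? ts 12 with
      | none =>
        rw [hidx] at ih
        simp only [Option.map_none]
        by_cases hs : t = 10 ∨ t = 11 ∨ t = 13
        · rcases hs with rfl | rfl | rfl <;> · simp [pvClean]; simpa using ih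
        · have h10 : t ≠ 10 := by tauto
          have h11 : t ≠ 11 := by tauto
          have h13 : t ≠ 13 := by tauto
          simp [pvClean, h12, h10, h11, h13]
          simpa using ih
      | some i =>
        rw [hidx] at ih
        simp only [Option.map_some, List.take_succ_cons]
        by_cases hs : t = 10 ∨ t = 11 ∨ t = 13
        · rcases hs with rfl | rfl | rfl <;> · simp [pvClean]; simpa using ih
        · have h10 : t ≠ 10 := by tauto
          have h11 : t ≠ 11 := by tauto
          have h13 : t ≠ 13 := by tauto
          simp [pvClean, h12, h10, h11, h13]
          simpa using ih

lemma pvSplitRowsB_no_row (grid : List (List Int)) (l : List Int) (h : (14:Int) ∉ l) :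
    pvSplitRowsB grid l = if l ≠ [] then grid ++ [l] else grid := by
  rw [pvSplitRowsB]
  split
  · rfl
  · next i h' =>
    obtain ⟨hk, hv, -⟩ := PySem.List.getElem_of_index?_eq_some h'
    exact absurd (hv ▸ List.getElem_mem hk) h

lemma pvSplitRowsB_split (grid : List (List Int)) (row rest : List Int) (h : (14:Int) ∉ row) :
    pvSplitRowsB grid (row ++ 14 :: rest)
      = pvSplitRowsB (if row ≠ [] then grid ++ [row] else grid) rest := by
  have hidx : PySem.List.index? (row ++ 14 :: rest) 14 = some row.length :=
    (PySem.List.index?_eq_some_iff (row ++ 14 :: rest) 14 row.length).mpr ⟨row, rest, rfl, rfl, h⟩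
  have htake : (row ++ 14 :: rest).take row.length = row := by simp
  have hdrop : (row ++ 14 :: rest).drop (row.length + 1) = rest := by
    rw [show row ++ 14 :: rest = (row ++ [14]) ++ rest by simp,
      show row.length + 1 = (row ++ [14]).length by simp, List.drop_left]
  rw [pvSplitRowsB]
  split
  · next h' => rw [h'] at hidx; cases hidx
  · next i h' =>
    rw [h'] at hidx
    have hi : i = row.length := Option.some.inj hidx
    subst hi
    rw [htake, hdrop]
    by_cases hr : row = []
    · simp [hr]
    · have : row.length ≠ 0 := by simpa using hr
      simp [hr, this]

lemma loopA_eq_split (ts : List Int) : ∀ (row : List Int) (grid : List (List Int)),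
    (14:Int) ∉ row → tokensToGridLoopA ts row grid = pvSplitRowsB grid (row ++ pvClean ts) := by
  induction ts with
  | nil =>
    intro row grid h
    rw [tokensToGridLoopA, pvClean, List.append_nil, pvSplitRowsB_no_row grid row h]
  | cons t ts ih =>
    intro row grid h
    rw [tokensToGridLoopA, pvClean]
    by_cases h12 : t = 12
    · rw [if_pos h12, if_pos h12, List.append_nil, pvSplitRowsB_no_row grid row h]
    · rw [if_neg h12, if_neg h12]
      by_cases hs : t = 10 ∨ t = 11 ∨ t = 13
      · have hs' : t = 10 ∨ t = 11 ∨ t = 12 ∨ t = 13 := by tauto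
        rw [if_pos hs', if_pos hs]
        exact ih row grid h
      · have hs' : ¬(t = 10 ∨ t = 11 ∨ t = 12 ∨ t = 13) := by tauto
        rw [if_neg hs', if_neg hs]
        by_cases h14 : t = 14
        · rw [if_pos h14, h14, pvSplitRowsB_split grid row (pvClean ts) h]
          simpa using ih [] (if row ≠ [] then grid ++ [row] else grid) (by simp)
        · rw [if_neg h14,
            show row ++ t :: pvClean ts = (row ++ [t]) ++ pvClean ts by simp]
          refine ih (row ++ [t]) grid ?_
          simp only [List.mem_append, List.mem_singleton]
          rintro (hm | h')
          · exact h hm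
          · exact h14 h'.symm

-- ===== VERDICT (by name: the statement is the Claim_ definition above) =====
theorem tokens_to_grid_spec : Claim_equal_tokens_to_grid := by
  intro tokens width _
  unfold Spec_tokens_to_grid tokens_to_grid tokens_to_grid_alt
  rw [loopA_eq_split tokens [] [] (by simp), List.nil_append, pvClean_eq_trunc_filter]
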